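-- pv_equiv track=rewrite | github.com/lddurbin/twelve_days_to_deming | scripts/extract-content.py | merge_column_text
-- ===== SOURCE A (Python) =====
-- from typing import List, Dict, Tuple, Optional
--
-- def merge_column_text(column_texts: List[str]) -> str:
--     """Merge text from multiple columns into a single text stream"""
--     if not column_texts:
--         return ""
--
--     if len(column_texts) == 1:
--         return column_texts[0]
--
--     # Split each column into lines
--     column_lines = [text.split('\n') for text in column_texts]
--
--     # Find the maximum number of lines
--     max_lines = max(len(lines) for lines in column_lines)
--
--     # Merge lines from all columns
--     merged_lines = []
--     for i in range(max_lines):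
--         line_parts = []
--         for lines in column_lines:
--             if i < len(lines) and lines[i].strip():
--                 line_parts.append(lines[i].strip())
--
--         if line_parts:
--             merged_lines.append(' '.join(line_parts))
--
--     return '\n'.join(merged_lines)
-- ===== SOURCE B (Python) =====
-- def merge_column_text(column_texts):
--     """Merge text from multiple columns into a single text stream"""
--     if not column_texts:
--         return ""
--     if len(column_texts) == 1:
--         return column_texts[0]
--     cols = [text.split('\n') for text in column_texts]
--     merged = []
--     # consume one row of heads at a time instead of indexing by i < max_lines
--     while any(cols):
--         parts = [c[0].strip() for c in cols if c and c[0].strip()]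
--         if parts:
--             merged.append(' '.join(parts))
--         cols = [c[1:] for c in cols]
--     return '\n'.join(merged)
-- ===== Notes on version B (the rewrite author's own statement) =====
-- stated objective: alternative
-- what changed: B replaces A's index-based loop over range(max_lines) with bounds checks by a head-consuming sweep: it repeatedly takes the first line of every column and drops it (cols = [c[1:] for c in cols]) until all columns are exhausted, so max_lines and the i < len(lines) checks disappear.
import Mathlib
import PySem

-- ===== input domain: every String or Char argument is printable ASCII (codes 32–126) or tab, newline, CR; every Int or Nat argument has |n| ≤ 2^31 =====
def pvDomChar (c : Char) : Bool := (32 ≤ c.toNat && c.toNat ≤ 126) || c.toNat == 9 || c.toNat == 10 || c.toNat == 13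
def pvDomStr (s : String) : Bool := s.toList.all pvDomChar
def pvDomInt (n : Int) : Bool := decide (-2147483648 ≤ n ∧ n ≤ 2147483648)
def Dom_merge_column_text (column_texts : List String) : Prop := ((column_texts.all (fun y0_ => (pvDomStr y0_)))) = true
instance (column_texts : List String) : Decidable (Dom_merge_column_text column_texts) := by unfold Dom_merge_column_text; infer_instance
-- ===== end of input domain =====

-- B replaces A's index loop over range(max_lines) by a head-consuming sweep over the columns; same cost, different traversal (objective: alternative).

-- ===== PORT A =====
def merge_column_text (column_texts : List String) : String :=
  if column_texts = [] then ""
  else if column_texts.length = 1 then column_texts.headD ""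
  else
    let column_lines := column_texts.map (fun text => (PySem.Str.split? text "\n").getD [])
    let max_lines := (column_lines.map (fun lines => lines.length)).foldl max 0
    let merged_lines := (List.range max_lines).foldl (fun acc i =>
      let line_parts := column_lines.foldl (fun ps lines =>
        if i < lines.length ∧ PySem.Str.strip (lines.getD i "") ≠ ""
        then ps ++ [PySem.Str.strip (lines.getD i "")] else ps) []
      if line_parts ≠ [] then acc ++ [PySem.Str.join " " line_parts] else acc) []
    PySem.Str.join "\n" merged_lines

-- ===== PORT B =====
-- termination helper for the while-loop port (cited in decreasing_by)
theorem pvRows_sum_le (cols : List (List String)) :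
    ((cols.map (fun c => c.drop 1)).map List.length).sum ≤ (cols.map List.length).sum := by
  induction cols with
  | nil => simp
  | cons c t ih =>
    simp only [List.map_cons, List.sum_cons]
    have hc : (c.drop 1).length ≤ c.length := by rw [List.length_drop]; omega
    omega

theorem pvRows_sum_lt (cols : List (List String)) (h : cols.any (fun c => c ≠ []) = true) :
    ((cols.map (fun c => c.drop 1)).map List.length).sum < (cols.map List.length).sum := by
  induction cols with
  | nil => simp at h
  | cons c t ih =>
    simp only [List.any_cons, Bool.or_eq_true] at h
    simp only [List.map_cons, List.sum_cons]
    rcases h with h | h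
    · cases c with
      | nil => simp at h
      | cons x xs =>
        have := pvRows_sum_le t
        have hx : ((x :: xs).drop 1).length = xs.length := by simp
        have hl : (x :: xs).length = xs.length + 1 := by simp
        omega
    · have := ih h
      have hc : (c.drop 1).length ≤ c.length := by rw [List.length_drop]; omega
      omega

-- the head extraction of B's comprehension [c[0].strip() for c in cols if c and c[0].strip()]
def pvHeadPart (c : List String) : Option String :=
  match c with
  | [] => none
  | x :: _ => let s := PySem.Str.strip x; if s ≠ "" then some s else none

-- the 'while any(cols)' loop of B, with the accumulator 'merged'
def pvMergeRows (cols : List (List String)) (merged : List String) : List String :=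
  if h : cols.any (fun c => c ≠ []) = true then
    let parts := cols.filterMap pvHeadPart
    pvMergeRows (cols.map (fun c => c.drop 1))
      (if parts ≠ [] then merged ++ [PySem.Str.join " " parts] else merged)
  else merged
termination_by (cols.map List.length).sum
decreasing_by simpa using pvRows_sum_lt cols h

def merge_column_text_alt (column_texts : List String) : String :=
  match column_texts with
  | [] => ""
  | [t] => t
  | _ =>
    let cols := column_texts.map (fun text => (PySem.Str.split? text "\n").getD [])
    PySem.Str.join "\n" (pvMergeRows cols [])

-- ===== PRECONDITION & SPEC =====
def Spec_merge_column_text (column_texts : List String) (out : String) : Prop := out = merge_column_text_alt column_texts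
instance (column_texts : List String) (out : String) : Decidable (Spec_merge_column_text column_texts out) := by unfold Spec_merge_column_text; infer_instance

-- ===== CLAIM (what is proved, stated in full; the proofs are below) =====
def Claim_equal_merge_column_text : Prop := ∀ (column_texts : List String), Dom_merge_column_text column_texts → Spec_merge_column_text column_texts (merge_column_text column_texts)

-- ===== LEMMAS AND PROOFS =====

-- A's per-row step (definitionally the body of A's outer fold)
def pvStepA (cols : List (List String)) : List String → Nat → List String :=
  fun acc i =>
    let line_parts := cols.foldl (fun ps lines =>
      if i < lines.length ∧ PySem.Str.strip (lines.getD i "") ≠ ""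
      then ps ++ [PySem.Str.strip (lines.getD i "")] else ps) []
    if line_parts ≠ [] then acc ++ [PySem.Str.join " " line_parts] else acc

def pvMaxLen (cols : List (List String)) : Nat := (cols.map List.length).foldl max 0

theorem pvFoldl_max_eq_zero_iff (l : List Nat) : ∀ (a : Nat), l.foldl max a = 0 ↔ a = 0 ∧ ∀ x ∈ l, x = 0 := by
  induction l with
  | nil => simp
  | cons x t ih =>
    intro a
    simp only [List.foldl_cons, ih (max a x), List.mem_cons]
    constructor
    · rintro ⟨h1, h2⟩
      refine ⟨by omega, ?_⟩
      rintro y (rfl | hy)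
      · omega
      · exact h2 y hy
    · rintro ⟨h1, h2⟩
      exact ⟨by have := h2 x (Or.inl rfl); omega, fun y hy => h2 y (Or.inr hy)⟩

theorem pvAny_eq_false_iff (cols : List (List String)) :
    cols.any (fun c => c ≠ []) = false ↔ pvMaxLen cols = 0 := by
  unfold pvMaxLen
  rw [pvFoldl_max_eq_zero_iff]
  constructor
  · intro h
    refine ⟨rfl, fun x hx => ?_⟩
    obtain ⟨c, hc, rfl⟩ := List.mem_map.mp hx
    have hc' := List.any_eq_false.mp h c hc
    simpa using hc'
  · rintro ⟨-, h⟩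
    apply List.any_eq_false.mpr
    intro c hc
    have := h c.length (List.mem_map_of_mem hc)
    simpa using this

theorem pvMax_sub_one (a b : Nat) : max (a - 1) (b - 1) = max a b - 1 := by omega

theorem pvFoldl_max_sub_one (l : List Nat) : ∀ (a : Nat), (l.map (fun x => x - 1)).foldl max (a - 1) = l.foldl max a - 1 := by
  induction l with
  | nil => intro a; simp
  | cons x t ih =>
    intro a
    simp only [List.map_cons, List.foldl_cons, pvMax_sub_one]
    exact ih (max a x)

theorem pvMaxLen_drop (cols : List (List String)) :
    pvMaxLen (cols.map (fun c => c.drop 1)) = pvMaxLen cols - 1 := by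
  unfold pvMaxLen
  have h1 : (cols.map (fun c => c.drop 1)).map List.length
      = (cols.map List.length).map (fun x => x - 1) := by
    simp [List.map_map, Function.comp_def]
  rw [h1]
  have := pvFoldl_max_sub_one (cols.map List.length) 0
  simpa using this

theorem pvLt_drop_iff (c : List String) (i : Nat) : i < (c.drop 1).length ↔ i + 1 < c.length := by
  cases c <;> simp

theorem pvGetD_drop (c : List String) (i : Nat) : (c.drop 1).getD i "" = c.getD (i + 1) "" := by
  cases c <;> simp

-- index shift: A's step on the tails is A's step at i+1 on the original columns
theorem pvStepA_shift (cols : List (List String)) (acc : List String) (i : Nat) :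
    pvStepA (cols.map (fun c => c.drop 1)) acc i = pvStepA cols acc (i + 1) := by
  unfold pvStepA
  rw [List.foldl_map]
  have hfun : (fun (ps : List String) (c : List String) =>
      if i < (c.drop 1).length ∧ PySem.Str.strip ((c.drop 1).getD i "") ≠ ""
      then ps ++ [PySem.Str.strip ((c.drop 1).getD i "")] else ps)
      = (fun (ps : List String) (c : List String) =>
      if i + 1 < c.length ∧ PySem.Str.strip (c.getD (i + 1) "") ≠ ""
      then ps ++ [PySem.Str.strip (c.getD (i + 1) "")] else ps) := by
    funext ps c
    simp only [pvLt_drop_iff, pvGetD_drop]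
  rw [hfun]

-- B's head comprehension equals A's inner fold at index 0
theorem pvParts_zero (cols : List (List String)) : ∀ (ps : List String),
    cols.foldl (fun ps lines =>
      if 0 < lines.length ∧ PySem.Str.strip (lines.getD 0 "") ≠ ""
      then ps ++ [PySem.Str.strip (lines.getD 0 "")] else ps) ps
    = ps ++ cols.filterMap pvHeadPart := by
  induction cols with
  | nil => intro ps; simp
  | cons c t ih =>
    intro ps
    rw [List.foldl_cons, List.filterMap_cons]
    cases c with
    | nil =>
      rw [if_neg (by simp)]
      rw [ih ps]
      rfl
    | cons x xs =>
      by_cases hx : PySem.Str.strip x = ""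
      · rw [if_neg (by simp [hx])]
        rw [ih ps]
        simp [pvHeadPart, hx]
      · rw [if_pos ⟨by simp, by simpa using hx⟩]
        have hg : (x :: xs).getD 0 "" = x := rfl
        rw [hg, ih (ps ++ [PySem.Str.strip x])]
        simp [pvHeadPart, hx]

theorem pvRange_foldl_succ (n : Nat) (f : List String → Nat → List String) (acc : List String) :
    (List.range (n + 1)).foldl f acc = (List.range n).foldl (fun a i => f a (i + 1)) (f acc 0) := by
  rw [List.range_succ_eq_map]
  simp [List.foldl_cons, List.foldl_map]

-- one iteration of B's while loop is A's step at row 0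
theorem pvFirstStep (cols : List (List String)) (acc : List String) :
    (if cols.filterMap pvHeadPart ≠ [] then acc ++ [PySem.Str.join " " (cols.filterMap pvHeadPart)] else acc)
    = pvStepA cols acc 0 := by
  unfold pvStepA
  simp only [pvParts_zero cols [], List.nil_append]

-- main loop correspondence
theorem pvMergeRows_eq (n : Nat) : ∀ (cols : List (List String)) (acc : List String),
    pvMaxLen cols = n → pvMergeRows cols acc = (List.range n).foldl (pvStepA cols) acc := by
  induction n with
  | zero =>
    intro cols acc hmax
    have hany : cols.any (fun c => c ≠ []) = false := (pvAny_eq_false_iff cols).mpr hmax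
    rw [pvMergeRows, dif_neg (by rw [hany]; simp)]
    simp
  | succ n ih =>
    intro cols acc hmax
    have hany : cols.any (fun c => c ≠ []) = true := by
      by_contra h
      have := (pvAny_eq_false_iff cols).mp (by simpa using h)
      omega
    have hdrop : pvMaxLen (cols.map (fun c => c.drop 1)) = n := by
      rw [pvMaxLen_drop, hmax]
      omega
    rw [pvMergeRows, dif_pos hany]
    rw [ih _ _ hdrop]
    rw [pvRange_foldl_succ n (pvStepA cols) acc]
    have hsh : (pvStepA (cols.map (fun c => c.drop 1))) = (fun a i => pvStepA cols a (i + 1)) := by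
      funext a i; exact pvStepA_shift cols a i
    rw [hsh]
    congr 1
    exact pvFirstStep cols acc

-- ===== VERDICT (by name: the statement is the Claim_ definition above) =====
theorem merge_column_text_spec : Claim_equal_merge_column_text := by
  intro cts _
  unfold Spec_merge_column_text
  match cts with
  | [] => rfl
  | [t] => simp [merge_column_text, merge_column_text_alt]
  | a :: b :: rest =>
    show PySem.Str.join "\n"
        ((List.range (pvMaxLen ((a :: b :: rest).map (fun text => (PySem.Str.split? text "\n").getD [])))).foldl
          (pvStepA ((a :: b :: rest).map (fun text => (PySem.Str.split? text "\n").getD []))) [])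
      = PySem.Str.join "\n"
        (pvMergeRows ((a :: b :: rest).map (fun text => (PySem.Str.split? text "\n").getD [])) [])
    rw [pvMergeRows_eq (pvMaxLen ((a :: b :: rest).map (fun text => (PySem.Str.split? text "\n").getD []))) _ [] rfl]
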